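-- pv_equiv track=rewrite | github.com/tgaspe/N-Queens-Problem | n_queens.py | checkAttacks
-- ===== SOURCE A (Python) =====
-- def checkAttacks(board):
--     '''
--     (list) -> list(tuples)
--     Helper function: Counts number of attacks between Queens.
--     Possible attacks are btw both diagonals and within the same collum (rows are excluded).
--     Returns a list of tuples, where each tuple represents an attack btw two queens.
--     '''
--     n = len(board)
--     attacks = 0
--     conflicts = []
--
--     i = 1
--     while i < n:
--         j = i + 1
--         while j < n:
--             pair = (i, j)
--             if   board[i] == board[j]:         # there is a Q already at the same collum on row level i
--                 conflicts.append(pair)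
--                 attacks += 1
--             elif board[i] == board[j] + j - i: # there is a Q already at the right ( / ) diagonal on row level i
--                 conflicts.append(pair)
--                 attacks += 1
--             elif board[i] == board[j] - j + i: # there is a Q already at the left  ( \ ) diagonal on row level i
--                 conflicts.append(pair)
--                 attacks += 1
--             j += 1
--         i += 1
--
--     return conflicts
-- ===== SOURCE B (Python) =====
-- def _pairs(g):
--     # all ordered pairs within one bucket (g is in increasing index order)
--     out = []
--     rest = g
--     while rest:
--         x, rest = rest[0], rest[1:]
--         out += [(x, y) for y in rest]
--     return out
--
--
-- def _buckets(board, key):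
--     # group indices 1..n-1 by key(i)
--     d = {}
--     for i in range(1, len(board)):
--         d.setdefault(key(i), []).append(i)
--     return d
--
--
-- def checkAttacks(board):
--     n = len(board)
--     pairs = []
--     for key in (lambda i: board[i],          # same column
--                 lambda i: board[i] + i,      # / diagonal
--                 lambda i: board[i] - i):     # \ diagonal
--         for g in _buckets(board, key).values():
--             pairs += _pairs(g)
--     pairs.sort(key=lambda p: p[0] * n + p[1])
--     return pairs
-- ===== Notes on version B (the rewrite author's own statement) =====
-- stated objective: alternative
-- what changed: Replaces the all-pairs double loop by three hash-map group-bys (column, / diagonal, \ diagonal) over indices 1..n-1; conflicting pairs are emitted bucket by bucket and the concatenation is sorted by (i,j) to restore the original lexicographic order.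
import Mathlib
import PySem

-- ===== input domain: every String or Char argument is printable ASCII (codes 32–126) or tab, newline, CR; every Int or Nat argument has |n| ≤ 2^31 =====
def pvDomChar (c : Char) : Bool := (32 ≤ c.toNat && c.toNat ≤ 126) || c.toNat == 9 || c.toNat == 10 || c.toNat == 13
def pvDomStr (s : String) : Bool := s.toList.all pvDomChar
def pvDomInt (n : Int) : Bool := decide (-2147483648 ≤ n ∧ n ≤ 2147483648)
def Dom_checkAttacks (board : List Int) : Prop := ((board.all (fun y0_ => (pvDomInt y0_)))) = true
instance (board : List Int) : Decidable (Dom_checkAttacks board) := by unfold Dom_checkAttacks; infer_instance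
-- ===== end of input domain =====

-- B replaces A's all-pairs double loop by three hash-map group-bys (column and the two
-- diagonal keys) over indices 1..n-1, emits the conflicting pairs bucket by bucket and
-- sorts them by (i, j) to restore A's lexicographic emission order.

-- ===== PORT A =====
-- (A's `attacks` counter never affects the returned list, so it is not carried.)
def checkAttacks (board : List Int) : List (Int × Int) :=
  (PySem.List.pyRange 1 (board.length : Int)).foldl (fun conflicts i =>
    (PySem.List.pyRange (i + 1) (board.length : Int)).foldl (fun conflicts j =>
      if PySem.List.pyGetD board i 0 = PySem.List.pyGetD board j 0 then conflicts ++ [(i, j)]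
      else if PySem.List.pyGetD board i 0 = PySem.List.pyGetD board j 0 + j - i then conflicts ++ [(i, j)]
      else if PySem.List.pyGetD board i 0 = PySem.List.pyGetD board j 0 - j + i then conflicts ++ [(i, j)]
      else conflicts) conflicts) []

-- ===== PORT B =====
-- Source B's `_pairs`: a while loop peeling the head and pairing it with the rest.
def pvPairsAux (out : List (Int × Int)) : List Int → List (Int × Int)
  | [] => out
  | x :: rest => pvPairsAux (out ++ rest.map (fun y => (x, y))) rest

def pvPairs (g : List Int) : List (Int × Int) := pvPairsAux [] g

-- Source B's `_buckets`: group indices 1..n-1 by key(i) via dict.setdefault(..., []).append(i)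
def pvBuckets (board : List Int) (key : Int → Int) : PySem.Dict Int (List Int) :=
  (PySem.List.pyRange 1 (board.length : Int)).foldl
    (fun d i => d.modify (key i) [] (fun g => g ++ [i])) PySem.Dict.empty

def checkAttacks_alt (board : List Int) : List (Int × Int) :=
  let n : Int := (board.length : Int)
  let pairs :=
    [(fun i => PySem.List.pyGetD board i 0),
     (fun i => PySem.List.pyGetD board i 0 + i),
     (fun i => PySem.List.pyGetD board i 0 - i)].foldl
      (fun pairs key =>
        (pvBuckets board key).values.foldl (fun pairs g => pairs ++ pvPairs g) pairs) []
  PySem.List.sorted pairs (fun p => p.1 * n + p.2)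

-- ===== PRECONDITION & SPEC =====
def Spec_checkAttacks (board : List Int) (out : List (Int × Int)) : Prop := out = checkAttacks_alt board
instance (board : List Int) (out : List (Int × Int)) : Decidable (Spec_checkAttacks board out) := by unfold Spec_checkAttacks; infer_instance

-- ===== CLAIM (what is proved, stated in full; the proofs are below) =====
def Claim_equal_checkAttacks : Prop := ∀ (board : List Int), Dom_checkAttacks board → Spec_checkAttacks board (checkAttacks board)

-- ===== LEMMAS AND PROOFS =====

-- proof-side abbreviations
def pvConf (board : List Int) (i j : Int) : Bool :=
  (PySem.List.pyGetD board i 0 == PySem.List.pyGetD board j 0) ||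
  (PySem.List.pyGetD board i 0 == PySem.List.pyGetD board j 0 + j - i) ||
  (PySem.List.pyGetD board i 0 == PySem.List.pyGetD board j 0 - j + i)

lemma pvConf_iff (board : List Int) (i j : Int) :
    pvConf board i j = true ↔
      (PySem.List.pyGetD board i 0 = PySem.List.pyGetD board j 0 ∨
       PySem.List.pyGetD board i 0 = PySem.List.pyGetD board j 0 + j - i ∨
       PySem.List.pyGetD board i 0 = PySem.List.pyGetD board j 0 - j + i) := by
  simp [pvConf, or_assoc]

-- A's emission order: i ascending, then j ascending
def pvLex (board : List Int) : List (Int × Int) :=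
  (PySem.List.pyRange 1 (board.length : Int)).flatMap (fun i =>
    ((PySem.List.pyRange (i + 1) (board.length : Int)).filter
      (fun j => pvConf board i j)).map (fun j => (i, j)))

-- the structural value of pvPairs
def pvPairsF : List Int → List (Int × Int)
  | [] => []
  | x :: rest => rest.map (fun y => (x, y)) ++ pvPairsF rest

-- one group-by's contribution to B's unsorted pair list
def pvPart (board : List Int) (key : Int → Int) : List (Int × Int) :=
  (PySem.Set.ofList ((PySem.List.pyRange 1 (board.length : Int)).map key)).flatMap
    (fun c => pvPairsF ((PySem.List.pyRange 1 (board.length : Int)).filter (fun i => key i == c)))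

lemma pvPairsAux_eq (g : List Int) (out : List (Int × Int)) :
    pvPairsAux out g = out ++ pvPairsF g := by
  induction g generalizing out with
  | nil => simp [pvPairsAux, pvPairsF]
  | cons x rest ih => simp [pvPairsAux, pvPairsF, ih]

lemma pvPairs_eq (g : List Int) : pvPairs g = pvPairsF g := by
  simp [pvPairs, pvPairsAux_eq]

lemma pvRange_pairwise_strong (a b : Int) :
    (PySem.List.pyRange a b).Pairwise (fun x y => a ≤ x ∧ x < y) := by
  by_cases h : a < b
  · rw [PySem.List.pyRange_one_cons h]
    refine List.Pairwise.cons ?_ ((pvRange_pairwise_strong (a + 1) b).imp ?_)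
    · intro x hx
      have := PySem.List.mem_pyRange_one.mp hx
      omega
    · intro x y hxy
      omega
  · have : PySem.List.pyRange a b = [] := by
      apply List.eq_nil_iff_forall_not_mem.mpr
      intro x hx
      have := PySem.List.mem_pyRange_one.mp hx
      omega
    simp [this]
termination_by (b - a).toNat
decreasing_by omega

lemma pvRange_pairwise (a b : Int) : (PySem.List.pyRange a b).Pairwise (· < ·) :=
  (pvRange_pairwise_strong a b).imp (fun h => h.2)

lemma mem_pvPairsF {g : List Int} (hg : g.Pairwise (· < ·)) (x y : Int) :
    (x, y) ∈ pvPairsF g ↔ x ∈ g ∧ y ∈ g ∧ x < y := by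
  induction g with
  | nil => simp [pvPairsF]
  | cons a rest ih =>
    rw [List.pairwise_cons] at hg
    constructor
    · intro hmem
      rcases List.mem_append.mp hmem with hmem | hmem
      · obtain ⟨b, hb, he⟩ := List.mem_map.mp hmem
        cases he
        exact ⟨List.mem_cons_self, List.mem_cons_of_mem _ hb, hg.1 _ hb⟩
      · obtain ⟨hx, hy, hlt⟩ := (ih hg.2).mp hmem
        exact ⟨List.mem_cons_of_mem _ hx, List.mem_cons_of_mem _ hy, hlt⟩
    · rintro ⟨hx, hy, hlt⟩
      rcases List.mem_cons.mp hx with hxa | hx'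
      · subst hxa
        rcases List.mem_cons.mp hy with hya | hy'
        · subst hya; exact (by omega : False).elim
        · exact List.mem_append.mpr (Or.inl (List.mem_map.mpr ⟨y, hy', rfl⟩))
      · rcases List.mem_cons.mp hy with hya | hy'
        · subst hya
          have h2 := hg.1 _ hx'
          exact (by omega : False).elim
        · exact List.mem_append.mpr (Or.inr ((ih hg.2).mpr ⟨hx', hy', hlt⟩))

lemma comp_mem_pvPairsF {g : List Int} {p : Int × Int} (hp : p ∈ pvPairsF g) :
    p.1 ∈ g ∧ p.2 ∈ g := by
  induction g with
  | nil => simp [pvPairsF] at hp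
  | cons a rest ih =>
    rcases List.mem_append.mp hp with h | h
    · obtain ⟨b, hb, he⟩ := List.mem_map.mp h
      cases he
      exact ⟨List.mem_cons_self, List.mem_cons_of_mem _ hb⟩
    · exact ⟨List.mem_cons_of_mem _ (ih h).1, List.mem_cons_of_mem _ (ih h).2⟩

lemma nodup_pvPairsF {g : List Int} (hg : g.Pairwise (· < ·)) : (pvPairsF g).Nodup := by
  induction g with
  | nil => simp [pvPairsF]
  | cons a rest ih =>
    rw [List.pairwise_cons] at hg
    refine List.Nodup.append ?_ (ih hg.2) ?_
    · exact (hg.2.nodup).map (fun y z h => by injection h)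
    · intro p hp1 hp2
      obtain ⟨b, hb, he⟩ := List.mem_map.mp hp1
      have h1 := (comp_mem_pvPairsF hp2).1
      cases he
      have := hg.1 _ h1; omega

lemma pvBuckets_keys (board : List Int) (key : Int → Int) :
    (pvBuckets board key).keys =
      PySem.Set.ofList ((PySem.List.pyRange 1 (board.length : Int)).map key) := by
  unfold pvBuckets
  rw [PySem.Dict.keys_foldl_modify_key _ key [] (fun _ i g => g ++ [i])]
  simp [PySem.Dict.keys_empty, PySem.Set.update, PySem.Set.ofList_eq_foldl]

lemma pvBuckets_nodup_keys (board : List Int) (key : Int → Int) :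
    (pvBuckets board key).keys.Nodup := by
  rw [pvBuckets_keys]; exact PySem.Set.nodup_ofList _

lemma pvBuckets_getD (board : List Int) (key : Int → Int) (c : Int) :
    (pvBuckets board key).getD c [] =
      (PySem.List.pyRange 1 (board.length : Int)).filter (fun i => key i == c) := by
  unfold pvBuckets
  have h : (PySem.List.pyRange 1 (board.length : Int)).foldl
        (fun d i => d.modify (key i) [] (fun g => g ++ [i])) PySem.Dict.empty
      = ((PySem.List.pyRange 1 (board.length : Int)).map (fun i => (key i, i))).foldl
        (fun d p => d.modify p.1 [] (fun g => g ++ [p.2])) PySem.Dict.empty :=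
    (List.foldl_map (f := fun i => (key i, i))
      (g := fun (d : PySem.Dict Int (List Int)) (p : Int × Int) =>
        d.modify p.1 [] (fun g => g ++ [p.2]))).symm
  rw [h, PySem.Dict.getD_foldl_modify_append]
  simp [List.filter_map, List.map_map, Function.comp_def]

lemma pvAlt_eq (board : List Int) :
    checkAttacks_alt board =
      PySem.List.sorted
        (pvPart board (fun i => PySem.List.pyGetD board i 0) ++
         pvPart board (fun i => PySem.List.pyGetD board i 0 + i) ++
         pvPart board (fun i => PySem.List.pyGetD board i 0 - i))
        (fun p => p.1 * (board.length : Int) + p.2) := by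
  have hval : ∀ key : Int → Int, ∀ pairs : List (Int × Int),
      (pvBuckets board key).values.foldl (fun pairs g => pairs ++ pvPairs g) pairs
        = pairs ++ pvPart board key := by
    intro key pairs
    rw [PySem.List.foldl_append_eq_flatMap pvPairs,
        PySem.Dict.values_eq_map_keys _ (pvBuckets_nodup_keys board key) [],
        pvBuckets_keys, List.flatMap_map]
    unfold pvPart
    simp only [pvBuckets_getD, pvPairs_eq]
  show PySem.List.sorted _ _ = _
  rw [List.foldl_cons, List.foldl_cons, List.foldl_cons, List.foldl_nil,
      hval, hval, hval]
  simp

lemma pvA_eq (board : List Int) : checkAttacks board = pvLex board := by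
  unfold checkAttacks pvLex
  rw [PySem.List.foldl_congr_mem _ _
      (fun conflicts i => conflicts ++
        ((PySem.List.pyRange (i + 1) (board.length : Int)).filter
          (fun j => pvConf board i j)).map (fun j => (i, j))) _ ?_]
  · rw [PySem.List.foldl_append_eq_flatMap]
    simp
  · intro acc i _
    rw [PySem.List.foldl_congr_mem _ _
        (fun conflicts j => if pvConf board i j then conflicts ++ [(i, j)] else conflicts) _ ?_]
    · exact PySem.List.foldl_append_if (fun j => pvConf board i j) (fun j => (i, j)) _ acc
    · intro acc' j _
      by_cases h1 : PySem.List.pyGetD board i 0 = PySem.List.pyGetD board j 0 <;>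
        by_cases h2 : PySem.List.pyGetD board i 0 = PySem.List.pyGetD board j 0 + j - i <;>
          by_cases h3 : PySem.List.pyGetD board i 0 = PySem.List.pyGetD board j 0 - j + i <;>
            simp [pvConf, h1, h2, h3]

lemma mem_pvLex (board : List Int) (i j : Int) :
    (i, j) ∈ pvLex board ↔
      1 ≤ i ∧ i < j ∧ j < (board.length : Int) ∧ pvConf board i j = true := by
  simp only [pvLex, List.mem_flatMap, List.mem_map, List.mem_filter,
    PySem.List.mem_pyRange_one]
  constructor
  · rintro ⟨a, ⟨ha1, ha2⟩, b, ⟨⟨hb1, hb2⟩, hc⟩, he⟩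
    cases he
    refine ⟨by omega, by omega, by omega, hc⟩
  · rintro ⟨h1, h2, h3, hc⟩
    exact ⟨i, ⟨by omega, by omega⟩, j, ⟨⟨by omega, by omega⟩, hc⟩, rfl⟩

lemma mem_pvPart (board : List Int) (key : Int → Int) (i j : Int) :
    (i, j) ∈ pvPart board key ↔
      (1 ≤ i ∧ i < (board.length : Int)) ∧ (1 ≤ j ∧ j < (board.length : Int)) ∧
        i < j ∧ key i = key j := by
  have hpw : ∀ c : Int, ((PySem.List.pyRange 1 (board.length : Int)).filter
      (fun i => key i == c)).Pairwise (· < ·) :=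
    fun c => (pvRange_pairwise _ _).filter _
  simp only [pvPart, List.mem_flatMap, PySem.Set.mem_ofList, List.mem_map]
  constructor
  · rintro ⟨c, -, hmem⟩
    obtain ⟨hi, hj, hlt⟩ := (mem_pvPairsF (hpw c) i j).mp hmem
    obtain ⟨hi1, hi2⟩ := List.mem_filter.mp hi
    obtain ⟨hj1, hj2⟩ := List.mem_filter.mp hj
    have hi3 := PySem.List.mem_pyRange_one.mp hi1
    have hj3 := PySem.List.mem_pyRange_one.mp hj1
    have : key i = c := by simpa using hi2
    have : key j = c := by simpa using hj2
    exact ⟨hi3, hj3, hlt, by omega⟩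
  · rintro ⟨hi, hj, hlt, hkey⟩
    refine ⟨key i, ⟨i, PySem.List.mem_pyRange_one.mpr hi, rfl⟩, ?_⟩
    refine (mem_pvPairsF (hpw (key i)) i j).mpr
      ⟨List.mem_filter.mpr ⟨PySem.List.mem_pyRange_one.mpr hi, by simp⟩,
       List.mem_filter.mpr ⟨PySem.List.mem_pyRange_one.mpr hj, by simp [hkey]⟩, hlt⟩

lemma key_of_mem_pvPart {board : List Int} {key : Int → Int} {c : Int} {p : Int × Int}
    (hp : p ∈ pvPairsF ((PySem.List.pyRange 1 (board.length : Int)).filter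
      (fun i => key i == c))) : key p.1 = c := by
  have := (comp_mem_pvPairsF hp).1
  have := (List.mem_filter.mp this).2
  simpa using this

lemma nodup_pvPart (board : List Int) (key : Int → Int) : (pvPart board key).Nodup := by
  unfold pvPart
  rw [List.nodup_flatMap]
  constructor
  · intro c _
    exact nodup_pvPairsF ((pvRange_pairwise _ _).filter _)
  · have hnd := PySem.Set.nodup_ofList ((PySem.List.pyRange 1 (board.length : Int)).map key)
    refine hnd.imp ?_
    intro c c' hne p hp1 hp2
    have h1 := key_of_mem_pvPart hp1
    have h2 := key_of_mem_pvPart hp2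
    exact hne (h1 ▸ h2 ▸ rfl)

lemma nodup_pvB (board : List Int) :
    (pvPart board (fun i => PySem.List.pyGetD board i 0) ++
     pvPart board (fun i => PySem.List.pyGetD board i 0 + i) ++
     pvPart board (fun i => PySem.List.pyGetD board i 0 - i)).Nodup := by
  refine List.Nodup.append (List.Nodup.append (nodup_pvPart _ _) (nodup_pvPart _ _) ?_)
    (nodup_pvPart _ _) ?_
  · rintro ⟨i, j⟩ h1 h2
    obtain ⟨-, -, hlt, hk⟩ := (mem_pvPart _ _ _ _).mp h1
    obtain ⟨-, -, -, hk'⟩ := (mem_pvPart _ _ _ _).mp h2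
    omega
  · rintro ⟨i, j⟩ h1 h2
    obtain ⟨-, -, -, hk'⟩ := (mem_pvPart _ _ _ _).mp h2
    rcases List.mem_append.mp h1 with h1 | h1
    · obtain ⟨-, -, hlt, hk⟩ := (mem_pvPart _ _ _ _).mp h1
      omega
    · obtain ⟨-, -, hlt, hk⟩ := (mem_pvPart _ _ _ _).mp h1
      omega

lemma mem_pvB_iff_mem_pvLex (board : List Int) (p : Int × Int) :
    p ∈ pvLex board ↔
      p ∈ pvPart board (fun i => PySem.List.pyGetD board i 0) ++
          pvPart board (fun i => PySem.List.pyGetD board i 0 + i) ++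
          pvPart board (fun i => PySem.List.pyGetD board i 0 - i) := by
  obtain ⟨i, j⟩ := p
  rw [mem_pvLex, List.mem_append, List.mem_append, mem_pvPart, mem_pvPart, mem_pvPart,
    pvConf_iff]
  constructor
  · rintro ⟨h1, h2, h3, hc⟩
    rcases hc with hc | hc | hc
    · exact Or.inl (Or.inl ⟨⟨h1, by omega⟩, ⟨by omega, h3⟩, h2, hc⟩)
    · exact Or.inl (Or.inr ⟨⟨h1, by omega⟩, ⟨by omega, h3⟩, h2, by omega⟩)
    · exact Or.inr ⟨⟨h1, by omega⟩, ⟨by omega, h3⟩, h2, by omega⟩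
  · rintro ((⟨⟨h1, -⟩, ⟨-, h3⟩, h2, hk⟩ | ⟨⟨h1, -⟩, ⟨-, h3⟩, h2, hk⟩) | ⟨⟨h1, -⟩, ⟨-, h3⟩, h2, hk⟩)
    · exact ⟨h1, h2, h3, Or.inl hk⟩
    · exact ⟨h1, h2, h3, Or.inr (Or.inl (by omega))⟩
    · exact ⟨h1, h2, h3, Or.inr (Or.inr (by omega))⟩

lemma pairwise_pvLex (board : List Int) :
    (pvLex board).Pairwise
      (fun p q => p.1 * (board.length : Int) + p.2 < q.1 * (board.length : Int) + q.2) := by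
  unfold pvLex
  rw [List.pairwise_flatMap]
  constructor
  · intro i _
    rw [List.pairwise_map]
    refine ((pvRange_pairwise _ _).filter _).imp ?_
    intro j j' h
    dsimp only
    linarith
  · refine (pvRange_pairwise_strong _ _).imp ?_
    rintro i i' ⟨hi1, hlt⟩ p hp q hq
    obtain ⟨j, hj, rfl⟩ := List.mem_map.mp hp
    obtain ⟨j', hj', rfl⟩ := List.mem_map.mp hq
    have h1 := PySem.List.mem_pyRange_one.mp (List.mem_filter.mp hj).1
    have h2 := PySem.List.mem_pyRange_one.mp (List.mem_filter.mp hj').1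
    have hn : (0 : Int) ≤ (board.length : Int) := by positivity
    have hmul : (i + 1) * (board.length : Int) ≤ i' * (board.length : Int) :=
      mul_le_mul_of_nonneg_right (by omega) hn
    have hadd : (i + 1) * (board.length : Int)
        = i * (board.length : Int) + (board.length : Int) := by ring
    dsimp only
    linarith [h1.1, h1.2, h2.1, h2.2, hi1]

lemma nodup_pvLex (board : List Int) : (pvLex board).Nodup := by
  refine (pairwise_pvLex board).imp ?_
  intro p q h he
  rw [he] at h
  exact absurd h (lt_irrefl _)

-- ===== VERDICT (by name: the statement is the Claim_ definition above) =====
theorem checkAttacks_spec : Claim_equal_checkAttacks := by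
  intro board _
  show checkAttacks board = checkAttacks_alt board
  rw [pvA_eq, pvAlt_eq]
  exact (PySem.List.sorted_eq_of_perm_of_pairwise_lt _ _ _
    ((List.perm_ext_iff_of_nodup (nodup_pvLex board) (nodup_pvB board)).mpr
      (mem_pvB_iff_mem_pvLex board))
    (pairwise_pvLex board)).symm
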